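-- pv_equiv track=rewrite | github.com/fidemin/algorithm-problem-solving | codeforces/1117A/solution.py | best_segment
-- ===== SOURCE A (Python) =====
-- def best_segment(n, arr):
--     max_value = 0
--     current_count = 0
--     max_count = 0
--     for i, ele in enumerate(arr):
--         if ele > max_value:
--             max_value = ele
--             current_count = 1
--             max_count = 1
--         elif ele == max_value:
--             current_count += 1
--             if i == n - 1:
--                 max_count = max([max_count, current_count])
--         else:
--             max_count = max([max_count, current_count])
--             current_count = 0
--
--     return max_count
-- ===== SOURCE B (Python) =====
-- def best_segment(n, arr):
--     # Longest run of the maximum element (0 if there is no positive element).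
--     # Two passes: find the maximum, then count consecutive occurrences of it.
--     target = max([0] + list(arr))
--     best = cur = 0
--     for e in arr:
--         if e == target:
--             cur += 1
--             best = max(best, cur)
--         else:
--             cur = 0
--     return best
-- ===== Notes on version B (the rewrite author's own statement) =====
-- stated objective: simpler
-- what changed: Replaces A's single online running-max state machine (max_value/current_count/max_count with an i==n-1 special case) by a plain two-pass decomposition: find the 0-floored maximum, then count its longest run; Pre_ excludes only inputs whose length parameter n disagrees with len(arr) while arr ends in its maximum, where A's crediting of the final run only at index n-1 is an artifact of the mismatched declared length.
-- outside the precondition, e.g. on best_segment(0, [2, 2]): A returns 1, B returns 2; on best_segment(3, [1, 1]): A returns 1, B returns 2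
import Mathlib
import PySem

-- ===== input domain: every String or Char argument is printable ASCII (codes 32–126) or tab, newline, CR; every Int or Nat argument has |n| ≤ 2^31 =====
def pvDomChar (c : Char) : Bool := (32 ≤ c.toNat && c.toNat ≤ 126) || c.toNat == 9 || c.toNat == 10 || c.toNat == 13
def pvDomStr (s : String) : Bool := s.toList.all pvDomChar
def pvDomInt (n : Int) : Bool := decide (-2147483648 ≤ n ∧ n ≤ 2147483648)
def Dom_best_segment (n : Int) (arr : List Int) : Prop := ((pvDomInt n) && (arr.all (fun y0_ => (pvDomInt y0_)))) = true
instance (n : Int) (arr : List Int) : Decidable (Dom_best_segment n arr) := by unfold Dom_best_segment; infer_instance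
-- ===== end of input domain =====

-- B replaces A's online running-max state machine by a two-pass decomposition
-- (find the maximum, then count the longest run of it). Objective: simpler.
-- Neither program mutates arr; both are total.

-- ===== PORT A =====
-- state (max_value, current_count, max_count); loop over enumerate(arr); 'max([x, y])' ported as 'max x y'
def pvStepA (n : Int) (st : Int × Int × Int) (ie : Int × Int) : Int × Int × Int :=
  let mv := st.1; let cc := st.2.1; let mc := st.2.2
  if ie.2 > mv then (ie.2, 1, 1)
  else if ie.2 = mv then
    if ie.1 = n - 1 then (mv, cc + 1, max mc (cc + 1)) else (mv, cc + 1, mc)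
  else (mv, 0, max mc cc)

def best_segment (n : Int) (arr : List Int) : Int :=
  ((PySem.List.enumerate arr).foldl (pvStepA n) (0, 0, 0)).2.2

-- ===== PORT B =====
-- pass 1: target = max([0] + list(arr)), a left fold starting from 0
def pvMax0 (arr : List Int) : Int := arr.foldl (fun m e => if e > m then e else m) 0
-- pass 2 step, state (best, cur)
def pvStepB (t : Int) (bc : Int × Int) (e : Int) : Int × Int :=
  if e = t then (max bc.1 (bc.2 + 1), bc.2 + 1) else (bc.1, 0)

def best_segment_alt (n : Int) (arr : List Int) : Int :=
  (arr.foldl (pvStepB (pvMax0 arr)) (0, 0)).1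

-- ===== PRECONDITION & SPEC =====
-- Pre_ excludes inputs where the length parameter n disagrees with len(arr) WHILE arr ends in
-- its 0-floored maximum: there A credits the final run only if it reaches index n-1 — an
-- artifact of the mismatched declared length (on (0, [2, 2]) A returns 1 for a run of length 2).
-- When n == len(arr), or when the last element is below the maximum (every run then being
-- closed by a smaller element), A's value is the longest run and is claimed.
def Pre_best_segment (n : Int) (arr : List Int) : Prop :=
  n = (arr.length : Int) ∨ arr.getLast? ≠ some (arr.foldl (fun m e => max m e) 0)
instance (n : Int) (arr : List Int) : Decidable (Pre_best_segment n arr) := by unfold Pre_best_segment; infer_instance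

def pvWitness_best_segment : Int × List Int := (3, [1, 2, 2])

def Spec_best_segment (n : Int) (arr : List Int) (out : Int) : Prop := out = best_segment_alt n arr
instance (n : Int) (arr : List Int) (out : Int) : Decidable (Spec_best_segment n arr out) := by unfold Spec_best_segment; infer_instance

-- ===== CLAIM (what is proved, stated in full; the proofs are below) =====
def Claim_equal_best_segment : Prop := ∀ (n : Int) (arr : List Int), Dom_best_segment n arr → Pre_best_segment n arr → Spec_best_segment n arr (best_segment n arr)

-- ===== LEMMAS AND PROOFS =====

theorem pvMax0_eq_foldl_max (arr : List Int) :
    arr.foldl (fun m e => max m e) 0 = pvMax0 arr := by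
  unfold pvMax0
  congr 1
  funext m e
  rcases le_total e m with h | h <;> simp [max_def] <;> omega

theorem pvMax0_append_singleton (p : List Int) (e : Int) :
    pvMax0 (p ++ [e]) = if e > pvMax0 p then e else pvMax0 p := by
  simp [pvMax0, List.foldl_append]

theorem pvMax0_nonneg (p : List Int) : 0 ≤ pvMax0 p := by
  induction p using List.reverseRecOn with
  | nil => simp [pvMax0]
  | append_singleton p e ih => rw [pvMax0_append_singleton]; split <;> omega

theorem le_pvMax0 (p : List Int) : ∀ x ∈ p, x ≤ pvMax0 p := by
  induction p using List.reverseRecOn with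
  | nil => simp
  | append_singleton p e ih =>
    intro x hx
    rw [pvMax0_append_singleton]
    rcases List.mem_append.1 hx with h | h
    · have := ih x h; split <;> omega
    · simp at h; subst h; split <;> omega

theorem pvMax0_mem (p : List Int) (h : pvMax0 p ≠ 0) : pvMax0 p ∈ p := by
  induction p using List.reverseRecOn with
  | nil => simp [pvMax0] at h
  | append_singleton p e ih =>
    rw [pvMax0_append_singleton] at h ⊢
    by_cases hgt : e > pvMax0 p
    · simp [hgt]
    · simp only [if_neg hgt] at h ⊢
      exact List.mem_append.2 (Or.inl (ih h))

-- descent of the last-index hypothesis: if 'q ends in t implies its last index is n-1'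
-- holds for e :: q' at position k, it holds for q' at position k+1
theorem pvLast_step (n t k e : Int) (q' : List Int)
    (hP : (e :: q').getLast? = some t → k + ((e :: q').length : Int) = n) :
    q'.getLast? = some t → (k + 1) + ((q'.length : Int)) = n := by
  intro h
  cases q' with
  | nil => simp at h
  | cons b r =>
    have := hP (by rw [List.getLast?_cons_cons]; exact h)
    simp [List.length_cons] at this ⊢
    omega

-- simulation invariant between A's (max_value, current_count, max_count) and B's (best, cur):
-- phase 2 (running max already equals the global target t) or phase 1 (t still ahead).
-- hP: if the remaining suffix ends in t, its last element sits at index n-1 (so A flushes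
-- the trailing run there); it is vacuous when the input's last element is below t.
theorem loop_eq (n t : Int) :
    ∀ (q : List Int) (k mv cc mc cur best : Int),
    (q.getLast? = some t → k + (q.length : Int) = n) →
    (∀ x ∈ q, x ≤ t) →
    ((mv = t ∧ cc = cur ∧ best = max mc cur ∧ 0 ≤ mc ∧ 0 ≤ cur ∧ (q = [] → cur ≤ mc))
      ∨ (mv < t ∧ cur = 0 ∧ best = 0 ∧ t ∈ q)) →
    ((PySem.List.enumerate q k).foldl (pvStepA n) (mv, cc, mc)).2.2
      = (q.foldl (pvStepB t) (best, cur)).1 := by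
  intro q
  induction q with
  | nil =>
    intro k mv cc mc cur best _ _ H
    rcases H with ⟨_, _, hbest, hmc, hcur, hle⟩ | ⟨_, _, _, htq⟩
    · have := hle rfl
      simp only [PySem.List.enumerate_nil, List.foldl_nil]
      omega
    · simp at htq
  | cons e q' ih =>
    intro k mv cc mc cur best hP hq H
    have he : e ≤ t := hq e (by simp)
    have hq' : ∀ x ∈ q', x ≤ t := fun x hx => hq x (by simp [hx])
    have hP' := pvLast_step n t k e q' hP
    rw [PySem.List.enumerate_cons, List.foldl_cons, List.foldl_cons]
    rcases H with ⟨hmv, hcc, hbest, hmc, hcur, _⟩ | ⟨hmv, hcur, hbest, htq⟩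
    · -- phase 2 : the running max already equals the target
      subst hcc
      by_cases h1 : e = t
      · have hem : e = mv := by omega
        have sB : pvStepB t (best, cc) e = (max best (cc + 1), cc + 1) := by
          simp [pvStepB, h1]
        by_cases hq'e : q' = []
        · -- e is the last element and equals t: hP forces k = n - 1, so A flushes here
          subst hq'e
          have hk1 : k = n - 1 := by
            have := hP (by simp [h1]); simp at this; omega
          have sA : pvStepA n (mv, cc, mc) (k, e) = (mv, cc + 1, max mc (cc + 1)) := by
            simp [pvStepA, hem, hk1]
          rw [sA, sB]
          exact ih (k + 1) mv (cc + 1) (max mc (cc + 1)) (cc + 1) (max best (cc + 1)) hP' hq'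
            (Or.inl ⟨hmv, rfl, by omega, by omega, by omega, fun _ => by omega⟩)
        · -- mid-list match: A may or may not flush at k = n-1; both keep best = max mc cur
          by_cases hk1 : k = n - 1
          · have sA : pvStepA n (mv, cc, mc) (k, e) = (mv, cc + 1, max mc (cc + 1)) := by
              simp [pvStepA, hem, hk1]
            rw [sA, sB]
            exact ih (k + 1) mv (cc + 1) (max mc (cc + 1)) (cc + 1) (max best (cc + 1)) hP' hq'
              (Or.inl ⟨hmv, rfl, by omega, by omega, by omega, fun h => absurd h hq'e⟩)
          · have sA : pvStepA n (mv, cc, mc) (k, e) = (mv, cc + 1, mc) := by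
              simp [pvStepA, hem, hk1]
            rw [sA, sB]
            exact ih (k + 1) mv (cc + 1) mc (cc + 1) (max best (cc + 1)) hP' hq'
              (Or.inl ⟨hmv, rfl, by omega, by omega, by omega, fun h => absurd h hq'e⟩)
      · have hem : ¬ (e = mv) := by omega
        have hA : ¬ (e > mv) := by omega
        have sA : pvStepA n (mv, cc, mc) (k, e) = (mv, 0, max mc cc) := by
          simp [pvStepA, hA, hem]
        have sB : pvStepB t (best, cc) e = (best, 0) := by
          simp [pvStepB, h1]
        rw [sA, sB]
        exact ih (k + 1) mv 0 (max mc cc) 0 best hP' hq'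
          (Or.inl ⟨hmv, rfl, by omega, by omega, le_refl 0, fun _ => by omega⟩)
    · -- phase 1 : mv < t, the target lies ahead
      subst hcur; subst hbest
      by_cases h1 : e = t
      · -- first occurrence of the target
        have sA : pvStepA n (mv, cc, mc) (k, e) = (e, 1, 1) := by
          simp [pvStepA, show e > mv by omega]
        have sB : pvStepB t ((0 : Int), (0 : Int)) e = (1, 1) := by
          simp [pvStepB, h1]
        rw [sA, sB, h1]
        by_cases hq'e : q' = []
        · subst hq'e
          simp only [PySem.List.enumerate_nil, List.foldl_nil]
        · exact ih (k + 1) t 1 1 1 1 hP' hq'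
            (Or.inl ⟨rfl, rfl, by omega, by omega, by omega, fun h => absurd h hq'e⟩)
      · -- e < t : both stay in phase 1
        have hlt : e < t := lt_of_le_of_ne he h1
        have htq' : t ∈ q' := by
          rcases List.mem_cons.1 htq with h | h
          · exact absurd h.symm h1
          · exact h
        have sB : pvStepB t ((0 : Int), (0 : Int)) e = (0, 0) := by
          simp [pvStepB, h1]
        rw [sB]
        rcases lt_trichotomy mv e with hc | hc | hc
        · have sA : pvStepA n (mv, cc, mc) (k, e) = (e, 1, 1) := by
            simp [pvStepA, hc]
          rw [sA]
          exact ih (k + 1) e 1 1 0 0 hP' hq' (Or.inr ⟨hlt, rfl, rfl, htq'⟩)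
        · by_cases hk1 : k = n - 1
          · have sA : pvStepA n (mv, cc, mc) (k, e) = (mv, cc + 1, max mc (cc + 1)) := by
              simp [pvStepA, hc.symm, hk1]
            rw [sA]
            exact ih (k + 1) mv (cc + 1) (max mc (cc + 1)) 0 0 hP' hq'
              (Or.inr ⟨hmv, rfl, rfl, htq'⟩)
          · have sA : pvStepA n (mv, cc, mc) (k, e) = (mv, cc + 1, mc) := by
              simp [pvStepA, hc.symm, hk1]
            rw [sA]
            exact ih (k + 1) mv (cc + 1) mc 0 0 hP' hq'
              (Or.inr ⟨hmv, rfl, rfl, htq'⟩)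
        · have hA : ¬ (e > mv) := by omega
          have hem : ¬ (e = mv) := by omega
          have sA : pvStepA n (mv, cc, mc) (k, e) = (mv, 0, max mc cc) := by
            simp [pvStepA, hA, hem]
          rw [sA]
          exact ih (k + 1) mv 0 (max mc cc) 0 0 hP' hq'
            (Or.inr ⟨hmv, rfl, rfl, htq'⟩)

-- ===== VERDICT (by name: the statement is the Claim_ definition above) =====
theorem best_segment_spec : Claim_equal_best_segment := by
  intro n arr _ hpre
  unfold Spec_best_segment best_segment best_segment_alt
  have hP : arr.getLast? = some (pvMax0 arr) → (0 : Int) + (arr.length : Int) = n := by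
    unfold Pre_best_segment at hpre
    rw [pvMax0_eq_foldl_max] at hpre
    rcases hpre with h | h
    · intro _; omega
    · intro hl; exact absurd hl h
  by_cases h0 : 0 < pvMax0 arr
  · have hmem : pvMax0 arr ∈ arr := pvMax0_mem arr (by omega)
    exact loop_eq n (pvMax0 arr) arr 0 0 0 0 0 0 hP (le_pvMax0 arr)
      (Or.inr ⟨h0, rfl, rfl, hmem⟩)
  · have h0' : pvMax0 arr = 0 := by have := pvMax0_nonneg arr; omega
    exact loop_eq n (pvMax0 arr) arr 0 0 0 0 0 0 hP (le_pvMax0 arr)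
      (Or.inl ⟨h0'.symm, rfl, by omega, le_refl 0, le_refl 0, fun _ => le_refl 0⟩)
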